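-- pv_equiv track=rewrite | github.com/MariaIsabelFierrosCastillo/Eda_I_recursando | Pruebas_11/codigo1.py | fibonacci_inverso
-- ===== SOURCE A (Python) =====
-- def fibonacci_inverso(n):
--     if n == 0:
--         return []
--     elif n == 1:
--         return [0]
--     elif n == 2:
--         return [1, 0]
--     else:
--         fib = fibonacci_inverso(n-1)
--         fib.append(fib[-1] + fib[-2])
--         return fib
-- ===== SOURCE B (Python) =====
-- def fibonacci_inverso(n):
--     if n == 0:
--         return []
--     if n == 1:
--         return [0]
--     fib = [1, 0]
--     for _ in range(2, n):
--         fib.append(fib[-1] + fib[-2])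
--     return fib
-- ===== Notes on version B (the rewrite author's own statement) =====
-- stated objective: idiomatic
-- what changed: Replaces the linear recursion (one Python call frame per element) with a forward iterative loop that appends fib[-1]+fib[-2] to a running list.
import Mathlib
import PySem

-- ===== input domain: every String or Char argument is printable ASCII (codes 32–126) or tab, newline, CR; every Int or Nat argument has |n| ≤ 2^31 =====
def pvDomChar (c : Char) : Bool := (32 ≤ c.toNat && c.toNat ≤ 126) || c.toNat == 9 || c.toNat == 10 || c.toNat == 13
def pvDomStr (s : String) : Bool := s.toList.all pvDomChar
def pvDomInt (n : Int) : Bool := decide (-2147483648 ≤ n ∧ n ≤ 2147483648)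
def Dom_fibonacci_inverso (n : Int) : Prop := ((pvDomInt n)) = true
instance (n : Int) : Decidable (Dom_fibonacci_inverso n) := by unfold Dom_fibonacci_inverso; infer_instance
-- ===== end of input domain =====

-- B replaces A's linear recursion by a forward iterative loop (objective: idiomatic,
-- no recursion depth needed); same return value for every n ≥ 0.

-- ===== PORT A =====
-- A recurses on n-1; the recursion is driven by n.toNat as the structural measure
-- (Pre_ restricts to n ≥ 0, where this fuel is exact; on n < 0 Python A recurses forever).
def fibAuxA : Nat → List Int
  | 0 => []
  | 1 => [0]
  | 2 => [1, 0]
  | (k+3) =>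
      let fib := fibAuxA (k+2)
      fib ++ [(PySem.List.pyGet? fib (-1)).getD 0 + (PySem.List.pyGet? fib (-2)).getD 0]

def fibonacci_inverso (n : Int) : List Int := fibAuxA n.toNat

-- ===== PORT B =====
def fibonacci_inverso_alt (n : Int) : List Int :=
  if n = 0 then []
  else if n = 1 then [0]
  else
    (PySem.List.pyRange 2 n 1).foldl
      (fun fib _ =>
        fib ++ [(PySem.List.pyGet? fib (-1)).getD 0 + (PySem.List.pyGet? fib (-2)).getD 0])
      [1, 0]

-- ===== PRECONDITION & SPEC =====
-- A raises RecursionError (infinite recursion) on n < 0; Pre_ excludes exactly those inputs.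
def Pre_fibonacci_inverso (n : Int) : Prop := 0 ≤ n
instance (n : Int) : Decidable (Pre_fibonacci_inverso n) := by unfold Pre_fibonacci_inverso; infer_instance
def pvWitness_fibonacci_inverso : Int := (7)

def Spec_fibonacci_inverso (n : Int) (out : List Int) : Prop := out = fibonacci_inverso_alt n
instance (n : Int) (out : List Int) : Decidable (Spec_fibonacci_inverso n out) := by unfold Spec_fibonacci_inverso; infer_instance

-- ===== CLAIM (what is proved, stated in full; the proofs are below) =====
def Claim_equal_fibonacci_inverso : Prop := ∀ (n : Int), Dom_fibonacci_inverso n → Pre_fibonacci_inverso n → Spec_fibonacci_inverso n (fibonacci_inverso n)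

-- ===== LEMMAS AND PROOFS =====

-- the loop body, shared shape of both ports
def fibStep (fib : List Int) : List Int :=
  fib ++ [(PySem.List.pyGet? fib (-1)).getD 0 + (PySem.List.pyGet? fib (-2)).getD 0]

-- a foldl whose function ignores the list element depends only on the length
theorem foldl_const_length {α β : Type} (f : β → β) (init : β) :
    ∀ (l : List α), l.foldl (fun s _ => f s) init = f^[l.length] init
  | [] => rfl
  | _ :: t => by
      simp [List.foldl_cons, foldl_const_length f (f init) t,
        Function.iterate_succ_apply]

theorem fibAuxA_eq_iterate : ∀ (k : Nat), fibAuxA (k + 2) = fibStep^[k] [1, 0]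
  | 0 => rfl
  | (k+1) => by
      show fibAuxA (k + 3) = _
      rw [Function.iterate_succ_apply']
      simp only [fibAuxA, fibStep, fibAuxA_eq_iterate k]

-- ===== VERDICT (by name: the statement is the Claim_ definition above) =====
theorem fibonacci_inverso_spec : Claim_equal_fibonacci_inverso := by
  intro n _ hpre
  unfold Pre_fibonacci_inverso at hpre
  unfold Spec_fibonacci_inverso fibonacci_inverso fibonacci_inverso_alt
  by_cases h0 : n = 0
  · subst h0; rfl
  · by_cases h1 : n = 1
    · subst h1; rfl
    · simp only [h0, h1, if_false]
      have h2 : 2 ≤ n := by omega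
      have hk : n.toNat = (n.toNat - 2) + 2 := by omega
      show fibAuxA n.toNat = (PySem.List.pyRange 2 n 1).foldl (fun fib _ => fibStep fib) [1, 0]
      rw [foldl_const_length (α := Int) fibStep [1, 0], hk, fibAuxA_eq_iterate]
      have hl : (PySem.List.pyRange 2 n 1).length = n.toNat - 2 := by
        rw [PySem.List.length_pyRange_one]; omega
      rw [hl]
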